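-- pv_equiv track=rewrite | github.com/MariaEduardaLadeia/ImplementacoesGrafos | ListaAresta.py | grau_vertices
-- ===== SOURCE A (Python) =====
-- def grau_vertices(vertices, arestas):
--     graus = {v: {"entrada": 0, "saida": 0, "total": 0} for v in vertices}
--     for origem, destino in arestas:
--         if origem in graus:
--             graus[origem]["saida"] += 1
--         if destino in graus:
--             graus[destino]["entrada"] += 1
--     for v in graus:
--         graus[v]["total"] = graus[v]["entrada"] + graus[v]["saida"]
--     return graus
-- ===== SOURCE B (Python) =====
-- def grau_vertices(vertices, arestas):
--     # per-vertex direct counting: for each first-seen vertex, count its in/out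
--     # endpoint occurrences over the edge list and build the entry in one step
--     graus = {}
--     for v in vertices:
--         if v not in graus:
--             entrada = sum(1 for (_o, d) in arestas if d == v)
--             saida = sum(1 for (o, _d) in arestas if o == v)
--             graus[v] = {"entrada": entrada, "saida": saida, "total": entrada + saida}
--     return graus
-- ===== Notes on version B (the rewrite author's own statement) =====
-- stated objective: simpler
-- what changed: Replaces A's init-zeros table, guarded in-place increments while scanning the edges, and a separate total-fixup pass by a per-vertex direct count: for each first-seen vertex the in/out degree is counted straight off the edge list and the entry is built complete in one step (no mutable degree table during the edge scan, no fixup pass).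
import Mathlib
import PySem

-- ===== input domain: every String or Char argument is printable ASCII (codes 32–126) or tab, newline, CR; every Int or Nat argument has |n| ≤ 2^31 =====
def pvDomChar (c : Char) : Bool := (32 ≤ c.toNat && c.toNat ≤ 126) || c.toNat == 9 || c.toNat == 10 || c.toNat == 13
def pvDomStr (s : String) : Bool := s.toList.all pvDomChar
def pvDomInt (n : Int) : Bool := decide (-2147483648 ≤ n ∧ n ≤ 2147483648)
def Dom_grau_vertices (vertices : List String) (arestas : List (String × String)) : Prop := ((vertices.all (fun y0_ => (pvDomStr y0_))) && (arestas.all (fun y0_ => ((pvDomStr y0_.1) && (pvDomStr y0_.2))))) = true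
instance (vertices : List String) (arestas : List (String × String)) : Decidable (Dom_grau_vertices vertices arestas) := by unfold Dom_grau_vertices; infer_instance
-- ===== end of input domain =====

-- B replaces A's accumulate-into-a-mutable-degree-table-then-fixup shape by a per-first-seen-vertex direct count over the edge list (simpler decomposition, same results).

-- ===== PORT A =====
def grau_vertices (vertices : List String) (arestas : List (String × String)) : List (String × List (String × Int)) :=
  -- graus = {v: {"entrada": 0, "saida": 0, "total": 0} for v in vertices}
  let graus : PySem.Dict String (PySem.Dict String Int) :=
    vertices.foldl (fun d v =>
      d.insert v (((PySem.Dict.empty.insert "entrada" (0 : Int)).insert "saida" 0).insert "total" 0)) PySem.Dict.empty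
  -- for origem, destino in arestas: guarded in-place increments
  let graus := arestas.foldl (fun d p =>
    let d := if d.contains p.1 then d.modify p.1 PySem.Dict.empty (fun i => i.modify "saida" 0 (· + 1)) else d
    if d.contains p.2 then d.modify p.2 PySem.Dict.empty (fun i => i.modify "entrada" 0 (· + 1)) else d) graus
  -- for v in graus: graus[v]["total"] = graus[v]["entrada"] + graus[v]["saida"]
  let graus := graus.keys.foldl (fun d v =>
    d.modify v PySem.Dict.empty (fun i => i.insert "total" (i.getD "entrada" 0 + i.getD "saida" 0))) graus
  graus.items.map (fun p => (p.1, p.2.items))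

-- ===== PORT B =====
def grau_vertices_alt (vertices : List String) (arestas : List (String × String)) : List (String × List (String × Int)) :=
  let graus : PySem.Dict String (PySem.Dict String Int) :=
    vertices.foldl (fun r v =>
      if r.contains v then r else
        -- entrada = sum(1 for (_o, d) in arestas if d == v); saida likewise
        let entrada : Int := (arestas.filter (fun p => p.2 == v)).length
        let saida : Int := (arestas.filter (fun p => p.1 == v)).length
        r.insert v (PySem.Dict.mk [("entrada", entrada), ("saida", saida), ("total", entrada + saida)]))
      PySem.Dict.empty
  graus.items.map (fun p => (p.1, p.2.items))

-- ===== PRECONDITION & SPEC =====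
def Spec_grau_vertices (vertices : List String) (arestas : List (String × String)) (out : List (String × List (String × Int))) : Prop := out = grau_vertices_alt vertices arestas
instance (vertices : List String) (arestas : List (String × String)) (out : List (String × List (String × Int))) : Decidable (Spec_grau_vertices vertices arestas out) := by unfold Spec_grau_vertices; infer_instance

-- ===== CLAIM (what is proved, stated in full; the proofs are below) =====
def Claim_equal_grau_vertices : Prop := ∀ (vertices : List String) (arestas : List (String × String)), Dom_grau_vertices vertices arestas → Spec_grau_vertices vertices arestas (grau_vertices vertices arestas)

-- ===== LEMMAS AND PROOFS =====

/-- The inner degree record as a literal association list. -/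
def inner3 (e s t : Int) : PySem.Dict String Int := PySem.Dict.mk [("entrada", e), ("saida", s), ("total", t)]

/-- The common closed form both programs compute. -/
def degList (vertices : List String) (arestas : List (String × String)) : List (String × List (String × Int)) :=
  (PySem.List.dedup vertices).map (fun v =>
    (v, [("entrada", ((arestas.map Prod.snd).count v : Int)),
         ("saida", ((arestas.map Prod.fst).count v : Int)),
         ("total", ((arestas.map Prod.snd).count v : Int) + ((arestas.map Prod.fst).count v : Int))]))

theorem innerBuild (e s t : Int) :
    ((PySem.Dict.empty.insert "entrada" e).insert "saida" s).insert "total" t = inner3 e s t := by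
  simp [PySem.Dict.insert, PySem.Dict.contains, PySem.Dict.empty, inner3]

theorem innerInsS (a b c x : Int) : (inner3 a b c).insert "saida" x = inner3 a x c := by
  simp [inner3, PySem.Dict.insert, PySem.Dict.contains, List.any_cons]

theorem innerInsE (a b c x : Int) : (inner3 a b c).insert "entrada" x = inner3 x b c := by
  simp [inner3, PySem.Dict.insert, PySem.Dict.contains, List.any_cons]

theorem innerGetE (a b c : Int) : (inner3 a b c).getD "entrada" 0 = a := by
  simp [inner3, PySem.Dict.getD, PySem.Dict.get?]

theorem innerGetS (a b c : Int) : (inner3 a b c).getD "saida" 0 = b := by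
  simp [inner3, PySem.Dict.getD, PySem.Dict.get?]

theorem innerInsT (a b c x : Int) : (inner3 a b c).insert "total" x = inner3 a b x := by
  simp [inner3, PySem.Dict.insert, PySem.Dict.contains, List.any_cons]

theorem innerItems (a b c : Int) : (inner3 a b c).items = [("entrada", a), ("saida", b), ("total", c)] := rfl

theorem dcontains_true (g : String → PySem.Dict String Int) (S : List String) (o : String) (h : o ∈ S) :
    (PySem.Dict.mk (S.map (fun v => (v, g v)))).contains o = true := by
  simp only [PySem.Dict.contains, List.any_map, List.any_eq_true]
  exact ⟨o, h, by simp⟩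

theorem dcontains_false (g : String → PySem.Dict String Int) (S : List String) (o : String) (h : o ∉ S) :
    (PySem.Dict.mk (S.map (fun v => (v, g v)))).contains o = false := by
  refine Bool.eq_false_iff.mpr ?_
  intro hc
  simp only [PySem.Dict.contains] at hc
  obtain ⟨q, hq, hbeq⟩ := List.any_eq_true.mp hc
  obtain ⟨v, hvS, rfl⟩ := List.mem_map.mp hq
  have hvo : v = o := by simpa using hbeq
  exact h (hvo ▸ hvS)

theorem dget (g : String → PySem.Dict String Int) (S : List String) (o : String) (h : o ∈ S) (d0 : PySem.Dict String Int) :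
    (PySem.Dict.mk (S.map (fun v => (v, g v)))).getD o d0 = g o := by
  induction S with
  | nil => cases h
  | cons x S ih =>
    by_cases hx : x = o
    · subst hx; simp [PySem.Dict.getD, PySem.Dict.get?, List.find?]
    · have ho : o ∈ S := by cases h with | head => exact absurd rfl hx | tail _ h => exact h
      have := ih ho
      simpa [PySem.Dict.getD, PySem.Dict.get?, List.find?, beq_eq_false_iff_ne.mpr hx] using this

theorem insert_present (g : String → PySem.Dict String Int) (S : List String) (o : String)
    (w : PySem.Dict String Int) (h : o ∈ S) :
    (PySem.Dict.mk (S.map (fun v => (v, g v)))).insert o w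
      = PySem.Dict.mk (S.map (fun v => (v, if v = o then w else g v))) := by
  simp only [PySem.Dict.insert, dcontains_true g S o h, if_true, List.map_map]
  congr 1
  apply List.map_congr_left
  intro v _
  by_cases hv : v = o
  · subst hv; simp
  · simp [hv]

theorem dkeys (g : String → PySem.Dict String Int) (S : List String) :
    (PySem.Dict.mk (S.map (fun v => (v, g v)))).keys = S := by
  simp [PySem.Dict.keys, List.map_map, Function.comp_def]

/-- A's initial comprehension: inserting a constant record for every vertex builds the dedup list. -/
theorem Ainit (l : List String) : ∀ (S : List String),
    l.foldl (fun d v => d.insert v (inner3 0 0 0)) (PySem.Dict.mk (S.map (fun v => (v, inner3 0 0 0))))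
      = PySem.Dict.mk ((PySem.Set.update S l).map (fun v => (v, inner3 0 0 0))) := by
  induction l with
  | nil => intro S; simp [PySem.Set.update]
  | cons x l ih =>
    intro S
    rw [List.foldl_cons]
    have hstep : (PySem.Dict.mk (S.map (fun v => (v, inner3 0 0 0)))).insert x (inner3 0 0 0)
        = PySem.Dict.mk ((PySem.Set.add S x).map (fun v => (v, inner3 0 0 0))) := by
      by_cases hx : x ∈ S
      · rw [insert_present _ _ _ _ hx]
        have hadd : PySem.Set.add S x = S := by simp [PySem.Set.add, hx]
        rw [hadd]
        congr 1
        apply List.map_congr_left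
        intro v _
        by_cases hv : v = x <;> simp [hv]
      · have hadd : PySem.Set.add S x = S ++ [x] := by simp [PySem.Set.add, hx]
        simp [PySem.Dict.insert, dcontains_false _ _ _ hx, hadd]
    rw [hstep, ih (PySem.Set.add S x)]
    rfl

theorem Ainit0 (l : List String) :
    l.foldl (fun d v => d.insert v (inner3 0 0 0)) PySem.Dict.empty
      = PySem.Dict.mk ((PySem.List.dedup l).map (fun v => (v, inner3 0 0 0))) := by
  have h := Ainit l []
  simpa [PySem.List.dedup, PySem.Set.ofList, PySem.Set.update, PySem.Set.empty, PySem.Dict.empty] using h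

/-- One guarded "saida" increment, as a pointwise update of the table. -/
theorem stageS (S : List String) (e s : String → Int) (o : String) :
    (if (PySem.Dict.mk (S.map (fun v => (v, inner3 (e v) (s v) 0)))).contains o
     then (PySem.Dict.mk (S.map (fun v => (v, inner3 (e v) (s v) 0)))).modify o PySem.Dict.empty (fun i => i.modify "saida" 0 (· + 1))
     else PySem.Dict.mk (S.map (fun v => (v, inner3 (e v) (s v) 0))))
      = PySem.Dict.mk (S.map (fun v => (v, inner3 (e v) (s v + if v = o then 1 else 0) 0))) := by
  by_cases ho : o ∈ S
  · rw [dcontains_true _ _ _ ho, if_pos rfl]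
    simp only [PySem.Dict.modify]
    rw [dget _ _ _ ho, innerGetS, innerInsS, insert_present _ _ _ _ ho]
    congr 1
    apply List.map_congr_left
    intro v _
    by_cases hv : v = o
    · subst hv; simp
    · simp [hv]
  · rw [dcontains_false _ _ _ ho]
    simp only [Bool.false_eq_true, if_false]
    congr 1
    apply List.map_congr_left
    intro v hv
    have : v ≠ o := by rintro rfl; exact ho hv
    simp [this]

/-- One guarded "entrada" increment, as a pointwise update of the table. -/
theorem stageE (S : List String) (e s : String → Int) (o : String) :
    (if (PySem.Dict.mk (S.map (fun v => (v, inner3 (e v) (s v) 0)))).contains o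
     then (PySem.Dict.mk (S.map (fun v => (v, inner3 (e v) (s v) 0)))).modify o PySem.Dict.empty (fun i => i.modify "entrada" 0 (· + 1))
     else PySem.Dict.mk (S.map (fun v => (v, inner3 (e v) (s v) 0))))
      = PySem.Dict.mk (S.map (fun v => (v, inner3 (e v + if v = o then 1 else 0) (s v) 0))) := by
  by_cases ho : o ∈ S
  · rw [dcontains_true _ _ _ ho, if_pos rfl]
    simp only [PySem.Dict.modify]
    rw [dget _ _ _ ho, innerGetE, innerInsE, insert_present _ _ _ _ ho]
    congr 1
    apply List.map_congr_left
    intro v _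
    by_cases hv : v = o
    · subst hv; simp
    · simp [hv]
  · rw [dcontains_false _ _ _ ho]
    simp only [Bool.false_eq_true, if_false]
    congr 1
    apply List.map_congr_left
    intro v hv
    have : v ≠ o := by rintro rfl; exact ho hv
    simp [this]

/-- A's edge loop accumulates the in/out counts of the processed edges. -/
theorem Aedges (l : List (String × String)) : ∀ (S : List String) (e s : String → Int),
    l.foldl (fun d p =>
        let d := if d.contains p.1 then d.modify p.1 PySem.Dict.empty (fun i => i.modify "saida" 0 (· + 1)) else d
        if d.contains p.2 then d.modify p.2 PySem.Dict.empty (fun i => i.modify "entrada" 0 (· + 1)) else d)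
      (PySem.Dict.mk (S.map (fun v => (v, inner3 (e v) (s v) 0))))
      = PySem.Dict.mk (S.map (fun v =>
          (v, inner3 (e v + ((l.map Prod.snd).count v : Int)) (s v + ((l.map Prod.fst).count v : Int)) 0))) := by
  induction l with
  | nil => intro S e s; simp
  | cons p l ih =>
    intro S e s
    simp only [List.foldl_cons]
    rw [stageS S e s p.1]
    rw [stageE S e (fun v => s v + if v = p.1 then 1 else 0) p.2]
    rw [ih S (fun v => e v + if v = p.2 then 1 else 0) (fun v => s v + if v = p.1 then 1 else 0)]
    clear ih
    have hsnd : ∀ w : String, (((p :: l).map Prod.snd).count w : Int)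
        = ((l.map Prod.snd).count w : Int) + if w = p.2 then 1 else 0 := by
      intro w
      by_cases h : w = p.2 <;> simp [List.count_cons, h] <;> first | omega | exact fun hx => h hx.symm
    have hfst : ∀ w : String, (((p :: l).map Prod.fst).count w : Int)
        = ((l.map Prod.fst).count w : Int) + if w = p.1 then 1 else 0 := by
      intro w
      by_cases h : w = p.1 <;> simp [List.count_cons, h] <;> first | omega | exact fun hx => h hx.symm
    congr 1
    apply List.map_congr_left
    intro v _
    rw [hsnd v, hfst v]
    congr 2 <;> ring

/-- One "total"-fixup step. -/
theorem stageT (S : List String) (e s t : String → Int) (k : String) (hk : k ∈ S) :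
    (PySem.Dict.mk (S.map (fun v => (v, inner3 (e v) (s v) (t v))))).modify k PySem.Dict.empty
        (fun i => i.insert "total" (i.getD "entrada" 0 + i.getD "saida" 0))
      = PySem.Dict.mk (S.map (fun v => (v, inner3 (e v) (s v) (if v = k then e v + s v else t v)))) := by
  simp only [PySem.Dict.modify]
  rw [dget _ _ _ hk, innerGetE, innerGetS, innerInsT, insert_present _ _ _ _ hk]
  congr 1
  apply List.map_congr_left
  intro v _
  by_cases hv : v = k
  · subst hv; simp
  · simp [hv]

/-- A's final pass writes entrada + saida into every visited total field. -/
theorem Atotal (ks : List String) : ∀ (S : List String) (e s t : String → Int), (∀ k ∈ ks, k ∈ S) →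
    ks.foldl (fun d v => d.modify v PySem.Dict.empty
        (fun i => i.insert "total" (i.getD "entrada" 0 + i.getD "saida" 0)))
      (PySem.Dict.mk (S.map (fun v => (v, inner3 (e v) (s v) (t v)))))
      = PySem.Dict.mk (S.map (fun v => (v, inner3 (e v) (s v) (if v ∈ ks then e v + s v else t v)))) := by
  induction ks with
  | nil => intro S e s t _; simp
  | cons k ks ih =>
    intro S e s t h
    simp only [List.foldl_cons]
    rw [stageT S e s t k (h k (List.mem_cons_self))]
    rw [ih S e s (fun v => if v = k then e v + s v else t v) (fun x hx => h x (List.mem_cons_of_mem _ hx))]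
    congr 1
    apply List.map_congr_left
    intro v _
    by_cases h1 : v ∈ ks <;> by_cases h2 : v = k <;> simp [h1, h2, List.mem_cons]

/-- A computes the closed form. -/
theorem Aside (vertices : List String) (arestas : List (String × String)) :
    grau_vertices vertices arestas = degList vertices arestas := by
  simp only [grau_vertices, innerBuild]
  rw [Ainit0 vertices]
  have hedge := Aedges arestas (PySem.List.dedup vertices) (fun _ => (0 : Int)) (fun _ => (0 : Int))
  simp only [zero_add] at hedge
  rw [hedge, dkeys]
  have htot := Atotal (PySem.List.dedup vertices) (PySem.List.dedup vertices)
      (fun v => ((arestas.map Prod.snd).count v : Int)) (fun v => ((arestas.map Prod.fst).count v : Int))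
      (fun _ => 0) (fun k hk => hk)
  rw [htot]
  simp only [degList, List.map_map]
  apply List.map_congr_left
  intro v hv
  have hv' : v ∈ vertices := by simpa using hv
  simp [innerItems, hv']

/-- B's guarded build loop creates exactly one entry per first-seen vertex. -/
theorem Bfold (f : String → PySem.Dict String Int) (l : List String) : ∀ (S : List String),
    l.foldl (fun r v => if r.contains v then r else r.insert v (f v))
      (PySem.Dict.mk (S.map (fun v => (v, f v))))
      = PySem.Dict.mk ((PySem.Set.update S l).map (fun v => (v, f v))) := by
  induction l with
  | nil => intro S; simp [PySem.Set.update]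
  | cons x l ih =>
    intro S
    rw [List.foldl_cons]
    by_cases hx : x ∈ S
    · rw [dcontains_true f S x hx, if_pos rfl]
      have hadd : PySem.Set.add S x = S := by simp [PySem.Set.add, hx]
      have := ih S
      rw [this]
      simp [PySem.Set.update, hadd]
    · rw [dcontains_false f S x hx]
      simp only [Bool.false_eq_true, if_false]
      have hins : (PySem.Dict.mk (S.map (fun v => (v, f v)))).insert x (f x)
          = PySem.Dict.mk ((S ++ [x]).map (fun v => (v, f v))) := by
        simp [PySem.Dict.insert, dcontains_false f S x hx]
      have hadd : PySem.Set.add S x = S ++ [x] := by simp [PySem.Set.add, hx]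
      rw [hins, ih (S ++ [x])]
      simp [PySem.Set.update, hadd]

/-- Counting by filtering over edges equals counting over the projected endpoint list. -/
theorem filter_count_fst (arestas : List (String × String)) (v : String) :
    ((arestas.filter (fun p => p.1 == v)).length : Int) = ((arestas.map Prod.fst).count v : Int) := by
  simp [List.count_eq_countP, List.countP_map, ← List.countP_eq_length_filter, Function.comp_def]

theorem filter_count_snd (arestas : List (String × String)) (v : String) :
    ((arestas.filter (fun p => p.2 == v)).length : Int) = ((arestas.map Prod.snd).count v : Int) := by
  simp [List.count_eq_countP, List.countP_map, ← List.countP_eq_length_filter, Function.comp_def]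

/-- B computes the closed form. -/
theorem Bside (vertices : List String) (arestas : List (String × String)) :
    grau_vertices_alt vertices arestas = degList vertices arestas := by
  simp only [grau_vertices_alt]
  have h := Bfold (fun v => inner3 ((arestas.filter (fun p => p.2 == v)).length : Int)
      ((arestas.filter (fun p => p.1 == v)).length : Int)
      (((arestas.filter (fun p => p.2 == v)).length : Int) + ((arestas.filter (fun p => p.1 == v)).length : Int)))
      vertices []
  simp only [List.map_nil] at h
  have hempty : (PySem.Dict.empty : PySem.Dict String (PySem.Dict String Int)) = PySem.Dict.mk [] := rfl
  rw [show (fun (r : PySem.Dict String (PySem.Dict String Int)) (v : String) =>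
      if r.contains v then r else
        let entrada : Int := (arestas.filter (fun p => p.2 == v)).length
        let saida : Int := (arestas.filter (fun p => p.1 == v)).length
        r.insert v (PySem.Dict.mk [("entrada", entrada), ("saida", saida), ("total", entrada + saida)]))
      = (fun r v => if r.contains v then r else r.insert v (inner3 ((arestas.filter (fun p => p.2 == v)).length : Int)
          ((arestas.filter (fun p => p.1 == v)).length : Int)
          (((arestas.filter (fun p => p.2 == v)).length : Int) + ((arestas.filter (fun p => p.1 == v)).length : Int))))
      from rfl, hempty, h]
  have hded : PySem.Set.update ([] : List String) vertices = PySem.List.dedup vertices := rfl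
  rw [hded]
  simp only [degList, List.map_map]
  apply List.map_congr_left
  intro v _
  simp [innerItems, filter_count_fst, filter_count_snd]

-- ===== VERDICT (by name: the statement is the Claim_ definition above) =====
theorem grau_vertices_spec : Claim_equal_grau_vertices := by
  intro vertices arestas _
  unfold Spec_grau_vertices
  exact (Aside vertices arestas).trans (Bside vertices arestas).symm
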